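-- pv_equiv track=rewrite | github.com/cyberclasssd/Summer-CTF-2021-Writeups | rev/jurassic5/jurassic5.py | checkFlag
-- ===== SOURCE A (Python) =====
-- def swap(string, i1, i2):
--     if (i2 == len(string)):
--         return string[i1]
--     return (string[i2] + string[i1])
--
-- def checkFlag(flag):
--     result = ""
--     for i in range(len(flag)):
--         result += flag[(i-5)%len(flag)]
--
--     result2 = ""
--     for i in range(0,len(result),2):
--         result2+=swap(result,i,i+1)
--
--     result3 = ""
--     for char in result2:
--         result3 += chr(ord(char)-10)
--
--     return result3 == "'Z&d\sWbq]fid_iekWkhUi)XjiU"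
-- ===== SOURCE B (Python) =====
-- def checkFlag(flag):
--     n = len(flag)
--     out = ""
--     for i in range(0, n, 2):
--         if i + 1 < n:
--             out += chr(ord(flag[(i + 1 - 5) % n]) - 10)
--             out += chr(ord(flag[(i - 5) % n]) - 10)
--         else:
--             out += chr(ord(flag[(i - 5) % n]) - 10)
--     return out == "'Z&d\sWbq]fid_iekWkhUi)XjiU"
-- ===== Notes on version B (the rewrite author's own statement) =====
-- stated objective: simpler
-- what changed: B replaces A's three sequential string passes (rotated string, pairwise-swapped string, shifted string) and the swap helper with one loop over even indices that emits each final character directly from the input via index arithmetic.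
import Mathlib
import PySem

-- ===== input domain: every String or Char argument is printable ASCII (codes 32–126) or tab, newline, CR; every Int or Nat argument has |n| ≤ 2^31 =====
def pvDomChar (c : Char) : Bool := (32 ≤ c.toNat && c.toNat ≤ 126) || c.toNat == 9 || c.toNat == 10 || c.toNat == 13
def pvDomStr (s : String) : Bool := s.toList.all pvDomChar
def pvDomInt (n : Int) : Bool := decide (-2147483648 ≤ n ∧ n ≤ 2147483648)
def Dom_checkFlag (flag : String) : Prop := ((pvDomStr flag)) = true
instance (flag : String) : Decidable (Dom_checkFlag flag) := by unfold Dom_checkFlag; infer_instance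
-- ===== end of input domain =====

-- B fuses A's three passes (rotate, pairwise swap, shift) into one loop over even
-- indices that emits each final character directly; same return value, not faster.


-- ===== PORT A =====
-- helper 'swap' of A; string indexing is in range wherever A's loop calls it
def swapPy (string : List Char) (i1 i2 : Int) : List Char :=
  if i2 = (string.length : Int) then [PySem.List.pyGetD string i1 ' ']
  else [PySem.List.pyGetD string i2 ' ', PySem.List.pyGetD string i1 ' ']

def checkFlag (flag : String) : Bool :=
  let s := flag.toList
  let n : Int := (s.length : Int)
  let result := (PySem.List.pyRange 0 n 1).foldl
    (fun acc i => acc ++ [PySem.List.pyGetD s (PySem.Int.mod (i - 5) n) ' ']) []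
  let result2 := (PySem.List.pyRange 0 (result.length : Int) 2).foldl
    (fun acc i => acc ++ swapPy result i (i + 1)) []
  let result3 := result2.foldl (fun acc c => acc ++ [Char.ofNat (c.toNat - 10)]) ([] : List Char)
  decide (result3 = "'Z&d\\sWbq]fid_iekWkhUi)XjiU".toList)

-- ===== PORT B =====
-- B's inner expression chr(ord(flag[(i-5)%n]) - 10)
def rotShift (s : List Char) (n i : Int) : Char :=
  Char.ofNat ((PySem.List.pyGetD s (PySem.Int.mod (i - 5) n) ' ').toNat - 10)

def checkFlag_alt (flag : String) : Bool :=
  let s := flag.toList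
  let n : Int := (s.length : Int)
  let out := (PySem.List.pyRange 0 n 2).foldl
    (fun acc i =>
      if i + 1 < n then acc ++ [rotShift s n (i + 1), rotShift s n i]
      else acc ++ [rotShift s n i]) []
  decide (out = "'Z&d\\sWbq]fid_iekWkhUi)XjiU".toList)

-- ===== PRECONDITION & SPEC =====
-- Pre_ excludes flags containing a tab: there chr(ord(c)-10) = chr(-1) raises
-- ValueError in Python A (and in B); on every other Dom input A returns normally.
def Pre_checkFlag (flag : String) : Prop := '\t' ∉ flag.toList
instance (flag : String) : Decidable (Pre_checkFlag flag) := by unfold Pre_checkFlag; infer_instance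
def pvWitness_checkFlag : String := "abc"
def Spec_checkFlag (flag : String) (out : Bool) : Prop := out = checkFlag_alt flag
instance (flag : String) (out : Bool) : Decidable (Spec_checkFlag flag out) := by unfold Spec_checkFlag; infer_instance

-- ===== CLAIM (what is proved, stated in full; the proofs are below) =====
def Claim_equal_checkFlag : Prop := ∀ (flag : String), Dom_checkFlag flag → Pre_checkFlag flag → Spec_checkFlag flag (checkFlag flag)

-- ===== LEMMAS AND PROOFS =====

-- congruence for flatMap over the same index list
theorem flatMap_congr_mem {α β : Type} {l : List α} {f g : α → List β}
    (h : ∀ x ∈ l, f x = g x) : List.flatMap f l = List.flatMap g l := by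
  induction l with
  | nil => rfl
  | cons a t ih =>
    simp only [List.flatMap_cons, h a (List.mem_cons_self), ih (fun x hx => h x (List.mem_cons_of_mem a hx))]

-- each even-index chunk of A, after the shift pass, is B's chunk
theorem chunk_eq (s : List Char) (i : Int)
    (h : i ∈ PySem.List.pyRange 0 (s.length : Int) 2) :
    (swapPy ((PySem.List.pyRange 0 (s.length : Int) 1).map
        (fun j => PySem.List.pyGetD s (PySem.Int.mod (j - 5) (s.length : Int)) ' ')) i (i + 1)).map
      (fun c => Char.ofNat (c.toNat - 10)) =
    (if i + 1 < (s.length : Int) then [rotShift s (s.length : Int) (i + 1), rotShift s (s.length : Int) i]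
     else [rotShift s (s.length : Int) i]) := by
  obtain ⟨h0, hlt, -⟩ := (PySem.List.mem_pyRange_iff_of_pos (by norm_num) i).mp h
  have hlen : (((PySem.List.pyRange 0 (s.length : Int) 1).map
      (fun j => PySem.List.pyGetD s (PySem.Int.mod (j - 5) (s.length : Int)) ' ')).length : Int)
      = (s.length : Int) := by
    rw [PySem.List.pyRange_zero_natCast]
    simp
  unfold swapPy
  rw [hlen]
  by_cases hc : i + 1 = (s.length : Int)
  · rw [if_pos hc, if_neg (by omega)]
    rw [PySem.List.pyGetD_map_pyRange_of_nonneg _ _ _ _ h0 hlt]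
    rfl
  · rw [if_neg hc, if_pos (by omega)]
    rw [PySem.List.pyGetD_map_pyRange_of_nonneg _ _ _ _ h0 hlt,
        PySem.List.pyGetD_map_pyRange_of_nonneg _ _ _ _ (by omega) (by omega)]
    rfl

-- ===== VERDICT (by name: the statement is the Claim_ definition above) =====
theorem checkFlag_spec : Claim_equal_checkFlag := by
  intro flag _ _
  unfold Spec_checkFlag checkFlag checkFlag_alt
  set s := flag.toList with hs
  simp only [PySem.List.foldl_append_singleton_eq_map, List.nil_append]
  have hlen : ((((PySem.List.pyRange 0 (s.length : Int) 1).map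
      (fun j => PySem.List.pyGetD s (PySem.Int.mod (j - 5) (s.length : Int)) ' ')).length : Int)) = (s.length : Int) := by
    rw [PySem.List.pyRange_zero_natCast]; simp
  rw [hlen]
  -- B's loop body: push the append outside the if
  have hbody : (fun (acc : List Char) (i : Int) =>
      if i + 1 < (s.length : Int) then acc ++ [rotShift s (s.length : Int) (i + 1), rotShift s (s.length : Int) i]
      else acc ++ [rotShift s (s.length : Int) i]) =
      (fun acc i => acc ++ (if i + 1 < (s.length : Int) then [rotShift s (s.length : Int) (i + 1), rotShift s (s.length : Int) i]
      else [rotShift s (s.length : Int) i])) := by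
    funext acc i; split <;> rfl
  rw [hbody]
  rw [PySem.List.foldl_append_eq_flatMap, PySem.List.foldl_append_eq_flatMap, List.nil_append, List.nil_append,
      List.map_flatMap]
  rw [flatMap_congr_mem (fun i hi => chunk_eq s i hi)]
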